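-- pv_equiv track=rewrite | github.com/PSVicky/problems-in-python | starpattern.py | function
-- ===== SOURCE A (Python) =====
-- def function(bits):
--     while len(bits) > 1:
--             current = bits.pop(0)
--             if current == 1:
--                 bits.pop(0)
--     if len(bits) == 0:
--         return False
--     return bits[0] == 0
-- ===== SOURCE B (Python) =====
-- def function(bits):
--     # Backward scan: no mutation of bits (A empties its argument; return value is the same).
--     if not bits:
--         return False
--     c = 0
--     i = len(bits) - 2
--     while i >= 0 and bits[i] == 1:
--         c += 1
--         i -= 1
--     if c % 2 == 0:
--         return bits[-1] == 0
--     return False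
-- ===== Notes on version B (the rewrite author's own statement) =====
-- stated objective: faster
-- what changed: Instead of destructively consuming the list from the front with repeated pop(0), B scans backward once: it counts the consecutive 1s immediately before the last element and, if that count is even, returns whether the last element equals 0 (odd means the last element was consumed; empty list gives False).
import Mathlib
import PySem

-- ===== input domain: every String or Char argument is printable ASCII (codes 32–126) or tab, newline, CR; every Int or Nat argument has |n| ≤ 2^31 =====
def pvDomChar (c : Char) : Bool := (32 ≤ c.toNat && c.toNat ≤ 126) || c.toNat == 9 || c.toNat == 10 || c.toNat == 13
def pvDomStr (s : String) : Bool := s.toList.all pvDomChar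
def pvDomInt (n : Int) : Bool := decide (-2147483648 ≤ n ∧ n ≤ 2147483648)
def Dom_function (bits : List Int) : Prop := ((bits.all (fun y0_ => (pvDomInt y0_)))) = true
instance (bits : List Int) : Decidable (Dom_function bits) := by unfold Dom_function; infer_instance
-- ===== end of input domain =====

-- B replaces A's front-consuming pop(0) loop by a single backward scan (B does not mutate
-- its argument while A empties it; the equivalence proved is about the return value only).

-- ===== PORT A =====
-- A's while loop: pop(0); if the popped value was 1, pop(0) again; until len(bits) <= 1
def functionLoop : List Int → List Int
  | [] => []
  | [x] => [x]
  | x :: y :: rest => if x == 1 then functionLoop rest else functionLoop (y :: rest)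

def function (bits : List Int) : Bool :=
  match functionLoop bits with
  | [] => false
  | x :: _ => x == 0

-- ===== PORT B =====
-- c = number of consecutive 1s immediately before the last element (B's backward while loop,
-- expressed as takeWhile over the reversed dropLast); even c → bits[-1]==0, odd c → False
def function_alt (bits : List Int) : Bool :=
  match bits.getLast? with
  | none => false
  | some last =>
    let c := ((bits.dropLast.reverse).takeWhile (fun x => x == 1)).length
    if c % 2 == 0 then last == 0 else false

-- ===== PRECONDITION & SPEC =====
def Spec_function (bits : List Int) (out : Bool) : Prop := out = function_alt bits
instance (bits : List Int) (out : Bool) : Decidable (Spec_function bits out) := by unfold Spec_function; infer_instance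

-- ===== CLAIM (what is proved, stated in full; the proofs are below) =====
def Claim_equal_function : Prop := ∀ (bits : List Int), Dom_function bits → Spec_function bits (function bits)

-- ===== LEMMAS AND PROOFS =====

-- length of takeWhile over an append
theorem tw_append_len (P : Int → Bool) (l m : List Int) :
    ((l ++ m).takeWhile P).length =
      if l.takeWhile P = l then l.length + (m.takeWhile P).length
      else (l.takeWhile P).length := by
  induction l with
  | nil => simp
  | cons a l ih =>
    by_cases hp : P a
    · simp only [List.cons_append, List.takeWhile_cons, hp, if_true, List.length_cons, ih]
      split_ifs with h1 h2 h3 <;> simp_all <;> omega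
    · simp [List.takeWhile_cons, hp]

-- appending a non-1 does not change the count of leading 1s
theorem tw_skip_len (l : List Int) (x : Int) (hx : (x == 1) = false) :
    ((l ++ [x]).takeWhile (fun z => z == 1)).length
      = (l.takeWhile (fun z => z == 1)).length := by
  rw [tw_append_len]
  split_ifs with h
  · simp [List.takeWhile_cons, hx, h]
  · rfl

-- appending [y, 1] preserves the parity of the count of leading 1s
theorem tw_two_parity (l : List Int) (y : Int) :
    (((l ++ [y, 1]).takeWhile (fun z => z == 1)).length) % 2
      = ((l.takeWhile (fun z => z == 1)).length) % 2 := by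
  rw [tw_append_len]
  split_ifs with h
  · rw [h]
    by_cases hy : (y == 1) = true
    · simp [hy]
    · simp [hy]
  · rfl

-- B ignores a leading non-1 (when at least two elements remain)
theorem alt_skip (x y : Int) (rest : List Int) (hx : (x == 1) = false) :
    function_alt (x :: y :: rest) = function_alt (y :: rest) := by
  unfold function_alt
  rw [List.getLast?_cons_cons]
  cases hg : (y :: rest).getLast? with
  | none => simp at hg
  | some last =>
    have hd : (x :: y :: rest).dropLast = x :: (y :: rest).dropLast := by
      simp [List.dropLast]
    rw [hd]
    simp only []
    rw [show (x :: (y :: rest).dropLast).reverse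
        = (y :: rest).dropLast.reverse ++ [x] by simp]
    rw [tw_skip_len _ _ hx]

-- B drops a leading 1 together with the following element (when at least one more remains)
theorem alt_two (y r0 : Int) (rs : List Int) :
    function_alt (1 :: y :: r0 :: rs) = function_alt (r0 :: rs) := by
  unfold function_alt
  rw [List.getLast?_cons_cons, List.getLast?_cons_cons]
  cases hg : (r0 :: rs).getLast? with
  | none => simp at hg
  | some last =>
    have hd : (1 :: y :: r0 :: rs).dropLast = 1 :: y :: (r0 :: rs).dropLast := by
      simp [List.dropLast]
    rw [hd]
    simp only []
    rw [show ((1 : Int) :: y :: (r0 :: rs).dropLast).reverse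
        = (r0 :: rs).dropLast.reverse ++ [y, 1] by simp]
    rw [tw_two_parity]

theorem main_eq : ∀ bits : List Int, function bits = function_alt bits := by
  intro bits
  induction bits using functionLoop.induct with
  | case1 => rfl
  | case2 x =>
    simp [function, functionLoop, function_alt]
  | case3 x y rest hx ih =>
    have hx1 : x = 1 := by simpa using hx
    subst hx1
    have hA : function (1 :: y :: rest) = function rest := by
      simp [function, functionLoop]
    rw [hA, ih]
    cases rest with
    | nil => simp [function_alt]
    | cons r0 rs => rw [alt_two]
  | case4 x y rest hx ih =>
    have hA : function (x :: y :: rest) = function (y :: rest) := by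
      simp [function, functionLoop, hx]
    rw [hA, ih, alt_skip x y rest (by simpa using hx)]

-- ===== VERDICT (by name: the statement is the Claim_ definition above) =====
theorem function_spec : Claim_equal_function := by
  intro bits _
  unfold Spec_function
  exact main_eq bits
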